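-- pv_equiv track=rewrite | github.com/bubbafat/lumiverb | src/workers/captions/openai_caption.py | _dedup_lines
-- ===== SOURCE A (Python) =====
-- def _dedup_lines(lines: list[str]) -> list[str]:
--     """Collapse consecutive repeating patterns (1+ lines) to at most 2."""
--     if not lines:
--         return lines
--     out: list[str] = []
--     i = 0
--     n = len(lines)
--     while i < n:
--         matched = False
--         # Try pattern lengths k = 1, 2, ... up to what could repeat 3+ times
--         for k in range(1, (n - i) // 3 + 1):
--             pattern = lines[i : i + k]
--             count = 1
--             j = i + k
--             while j + k <= n and lines[j : j + k] == pattern: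
--                 count += 1
--                 j += k
--             if count > 2:
--                 out.extend(pattern)
--                 out.extend(pattern)
--                 i = j  # skip past all repetitions
--                 matched = True
--                 break
--         if not matched:
--             out.append(lines[i])
--             i += 1
--     return out
-- ===== SOURCE B (Python) =====
-- def _dedup_lines(lines: list[str]) -> list[str]:
--     """Collapse consecutive repeating patterns (1+ lines) to at most 2.
--
--     Two staged passes instead of A's on-the-fly slice comparisons: first a
--     backward dynamic-programming pass builds ext[d][i], the length of the
--     longest common extension of the suffixes at i and i+d (ext[d][i] =
--     ext[d][i+1] + 1 if lines[i] == lines[i+d] else 0); then the emitting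
--     pass does no line comparisons at all -- a period-k run of >= 3 copies
--     starts at i iff ext[k][i] >= 2*k, and the skip target is
--     i + k + (ext[k][i] // k) * k.
--     """
--     n = len(lines)
--     ext: list[list[int]] = [[]]  # index 0 unused (periods start at 1)
--     for d in range(1, n):
--         row = [0] * (n - d + 1)
--         for i in range(n - d - 1, -1, -1):
--             if lines[i] == lines[i + d]:
--                 row[i] = row[i + 1] + 1
--         ext.append(row)
--     out: list[str] = []
--     i = 0
--     while i < n:
--         for k in range(1, (n - i) // 3 + 1):
--             L = ext[k][i]
--             if L >= 2 * k:
--                 out += lines[i : i + k] * 2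
--                 i += k + (L // k) * k
--                 break
--         else:
--             out.append(lines[i])
--             i += 1
--     return out
-- ===== Notes on version B (the rewrite author's own statement) =====
-- stated objective: faster
-- what changed: A interleaves detection with emission, repeatedly slicing out the k-line pattern and comparing successive k-line slices block by block at each position; B is two staged passes over a new data structure: a backward dynamic-programming pass fills a table ext[d][i] of longest-common-extension lengths (ext[d][i] = ext[d][i+1]+1 if lines[i]==lines[i+d] else 0), after which the emitting pass performs no line comparisons at all, deciding a run by the arithmetic test ext[k][i] >= 2*k and jumping by i + k + (ext[k][i]//k)*k.
import Mathlib
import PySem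

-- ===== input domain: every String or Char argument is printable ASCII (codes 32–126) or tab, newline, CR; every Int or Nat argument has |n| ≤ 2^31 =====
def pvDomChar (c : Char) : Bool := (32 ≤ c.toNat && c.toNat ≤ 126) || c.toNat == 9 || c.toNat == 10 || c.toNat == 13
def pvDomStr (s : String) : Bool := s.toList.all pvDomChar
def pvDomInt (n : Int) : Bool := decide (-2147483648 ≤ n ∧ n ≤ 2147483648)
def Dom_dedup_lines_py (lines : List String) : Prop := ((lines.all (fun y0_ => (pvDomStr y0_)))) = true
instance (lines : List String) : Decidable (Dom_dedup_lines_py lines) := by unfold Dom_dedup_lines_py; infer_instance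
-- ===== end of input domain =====

-- B replaces A's interleaved slice-and-compare detection by a staged computation: a backward
-- dynamic-programming table of longest-common-extension lengths built first, then an emitting
-- pass that decides runs purely arithmetically (objective: faster, measured in a timing run).

-- lines[a:a+k] (slicing primitive of both ports)
def pvSlice (lines : List String) (a k : Nat) : List String :=
  PySem.List.slice lines (some (a : Int)) (some ((a : Int) + (k : Int)))

-- ===== PORT A =====
-- inner `while j + k <= n and lines[j:j+k] == pattern` loop; returns (count, j).
-- the fuel argument only makes the loop total (j strictly increases, so fuel n+1 never runs out).
def pvBlockLoop (lines pattern : List String) (n k : Nat) : Nat → Nat → Nat → Nat × Nat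
  | 0, j, count => (count, j)
  | fuel + 1, j, count =>
    if j + k ≤ n ∧ pvSlice lines j k = pattern then
      pvBlockLoop lines pattern n k fuel (j + k) (count + 1)
    else (count, j)

-- A's `for k in range(1, (n-i)//3 + 1)` body: first k whose pattern repeats > 2 times,
-- returning (pattern, j) of the successful k (none = loop fell through).
def pvTryK (lines : List String) (n i : Nat) : List Nat → Option (List String × Nat)
  | [] => none
  | k :: rest =>
    let pattern := pvSlice lines i k
    let cj := pvBlockLoop lines pattern n k (n + 1) (i + k) 1
    if 2 < cj.1 then some (pattern, cj.2) else pvTryK lines n i rest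

-- A's outer while loop over i with accumulator out; the fuel argument only makes the
-- loop total (i strictly increases each iteration, so fuel n+1 is never exhausted).
def pvOuterA (lines : List String) (n : Nat) : Nat → Nat → List String → List String
  | 0, _, out => out
  | fuel + 1, i, out =>
    if i < n then
      match pvTryK lines n i (List.range' 1 ((n - i) / 3)) with
      | some (pattern, j) => pvOuterA lines n fuel j (out ++ pattern ++ pattern)
      | none => pvOuterA lines n fuel (i + 1) (out ++ [lines.getD i ""])
    else out

def dedup_lines_py (lines : List String) : List String :=
  if lines = [] then lines
  else pvOuterA lines lines.length (lines.length + 1) 0 []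

-- ===== PORT B =====
-- Source B's backward fill of row d: suffix of the row from index i on; row[n-d] = 0 sentinel,
-- row[i] = row[i+1] + 1 if lines[i] == lines[i+d] else 0.
def pvRowSuffix (lines : List String) (n d : Nat) : Nat → Nat → List Nat
  | 0, _ => [0]
  | fuel + 1, i =>
    if i < n - d then
      (if lines.getD i "" = lines.getD (i + d) "" then (pvRowSuffix lines n d fuel (i + 1)).headD 0 + 1
       else 0) :: pvRowSuffix lines n d fuel (i + 1)
    else [0]

-- the table `ext` of Source B: index-0 placeholder, then one row per period d = 1 .. n-1
def pvExt (lines : List String) (n : Nat) : List (List Nat) :=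
  [[]] ++ (List.range' 1 (n - 1)).map (fun d => pvRowSuffix lines n d (n - d) 0)

-- B's `for k...` body: first k whose table entry shows ≥ 3 copies; returns (k, L)
def pvTryKB (ext : List (List Nat)) (i : Nat) : List Nat → Option (Nat × Nat)
  | [] => none
  | k :: rest =>
    let L := (ext.getD k []).getD i 0
    if 2 * k ≤ L then some (k, L) else pvTryKB ext i rest

-- B's emitting while loop (does no line comparisons); same fuel-style totality guard as pvOuterA
def pvOuterB (lines : List String) (ext : List (List Nat)) (n : Nat) :
    Nat → Nat → List String → List String
  | 0, _, out => out
  | fuel + 1, i, out =>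
    if i < n then
      match pvTryKB ext i (List.range' 1 ((n - i) / 3)) with
      | some (k, L) =>
          pvOuterB lines ext n fuel (i + k + (L / k) * k) (out ++ pvSlice lines i k ++ pvSlice lines i k)
      | none => pvOuterB lines ext n fuel (i + 1) (out ++ [lines.getD i ""])
    else out

def dedup_lines_py_alt (lines : List String) : List String :=
  pvOuterB lines (pvExt lines lines.length) lines.length (lines.length + 1) 0 []

-- ===== PRECONDITION & SPEC =====
def Spec_dedup_lines_py (lines : List String) (out : List String) : Prop := out = dedup_lines_py_alt lines
instance (lines : List String) (out : List String) : Decidable (Spec_dedup_lines_py lines out) := by unfold Spec_dedup_lines_py; infer_instance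

-- ===== CLAIM (what is proved, stated in full; the proofs are below) =====
def Claim_equal_dedup_lines_py : Prop := ∀ (lines : List String), Dom_dedup_lines_py lines → Spec_dedup_lines_py lines (dedup_lines_py lines)

-- ===== LEMMAS AND PROOFS =====

-- proof-side reference function: longest common extension of the suffixes at i and i+k
def pvLce (lines : List String) (n i k L : Nat) : Nat :=
  if i + k + L < n ∧ lines.getD (i + L) "" = lines.getD (i + k + L) "" then
    pvLce lines n i k (L + 1)
  else L
  termination_by n - (i + k + L)
  decreasing_by omega

-- loop-invariant predicate: position t lies inside the common extension of the suffixes at i and i+k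
def pvRun (lines : List String) (n i k t : Nat) : Prop :=
  i + k + t < n ∧ lines.getD (i + t) "" = lines.getD (i + k + t) ""

theorem pvLce_spec (lines : List String) (n i k L0 : Nat) :
    (∀ t, L0 ≤ t → t < pvLce lines n i k L0 → pvRun lines n i k t) ∧
    ¬ pvRun lines n i k (pvLce lines n i k L0) ∧ L0 ≤ pvLce lines n i k L0 := by
  fun_induction pvLce with
  | case1 L h ih =>
    refine ⟨?_, ih.2.1, le_trans (by omega) ih.2.2⟩
    intro t ht1 ht2
    rcases Nat.eq_or_lt_of_le ht1 with rfl | hlt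
    · exact h
    · exact ih.1 t (by omega) ht2
  | case2 L h =>
    exact ⟨fun t h1 h2 => absurd h1 (by omega), h, le_rfl⟩

theorem pvLce_shift (lines : List String) (n k : Nat) :
    ∀ i L, pvLce lines n i k (L + 1) = pvLce lines n (i + 1) k L + 1 := by
  intro i L
  suffices H : ∀ m i L, n - (i + k + L) ≤ m →
      pvLce lines n i k (L + 1) = pvLce lines n (i + 1) k L + 1 by
    exact H (n - (i + k + L)) i L le_rfl
  intro m
  induction m with
  | zero =>
    intro i L hm
    rw [pvLce, if_neg (by omega), pvLce, if_neg (by omega)]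
  | succ m ih =>
    intro i L hm
    have e1 : i + 1 + L = i + (L + 1) := by omega
    have e2 : i + 1 + k + L = i + k + (L + 1) := by omega
    by_cases hc : i + k + (L + 1) < n ∧ lines.getD (i + (L + 1)) "" = lines.getD (i + k + (L + 1)) ""
    · rw [pvLce, if_pos hc]
      conv_rhs => rw [pvLce]
      rw [if_pos (by refine ⟨by omega, ?_⟩; rw [e1, e2]; exact hc.2)]
      exact ih i (L + 1) (by omega)
    · rw [pvLce, if_neg hc]
      conv_rhs => rw [pvLce]
      rw [if_neg (by intro h; exact hc ⟨by omega, by rw [← e1, ← e2]; exact h.2⟩)]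

-- the DP table row agrees with pvLce at every admissible index
theorem pvRowSuffix_getD (lines : List String) (n d : Nat) :
    ∀ fuel i, n - d - i ≤ fuel → ∀ t, i + t + d ≤ n →
      (pvRowSuffix lines n d fuel i).getD t 0 = pvLce lines n (i + t) d 0 := by
  intro fuel
  induction fuel with
  | zero =>
    intro i hf t ht
    have ht0 : t = 0 := by omega
    subst ht0
    rw [pvRowSuffix, pvLce, if_neg (by omega)]
    simp [List.getD]
  | succ fuel ih =>
    intro i hf t ht
    rw [pvRowSuffix]
    by_cases hi : i < n - d
    · rw [if_pos hi]
      cases t with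
      | zero =>
        have hhead : (pvRowSuffix lines n d fuel (i + 1)).headD 0
            = (pvRowSuffix lines n d fuel (i + 1)).getD 0 0 := by
          cases hr : pvRowSuffix lines n d fuel (i + 1) <;> simp [List.getD]
        simp only [List.getD_cons_zero, Nat.add_zero]
        rw [pvLce]
        by_cases he : lines.getD i "" = lines.getD (i + d) ""
        · rw [if_pos he, if_pos (by simpa using ⟨by omega, he⟩), pvLce_shift, hhead,
            ih (i + 1) (by omega) 0 (by omega)]
        · rw [if_neg he, if_neg (by simpa using fun _ => he)]
      | succ t =>
        simp only [List.getD_cons_succ]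
        rw [ih (i + 1) (by omega) t (by omega)]
        congr 1
        omega
    · rw [if_neg hi]
      have ht0 : t = 0 := by omega
      subst ht0
      rw [pvLce, if_neg (by omega)]
      simp [List.getD]

theorem pvExt_getD (lines : List String) (n k : Nat) (hk : 0 < k) (hkn : k < n) :
    (pvExt lines n).getD k [] = pvRowSuffix lines n k (n - k) 0 := by
  obtain ⟨k', rfl⟩ : ∃ k', k = k' + 1 := ⟨k - 1, by omega⟩
  unfold pvExt
  rw [show ([[]] ++ (List.range' 1 (n - 1)).map fun d => pvRowSuffix lines n d (n - d) 0)
      = [] :: (List.range' 1 (n - 1)).map (fun d => pvRowSuffix lines n d (n - d) 0) from rfl,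
    List.getD_cons_succ]
  have hlen : k' < ((List.range' 1 (n - 1)).map fun d => pvRowSuffix lines n d (n - d) 0).length := by
    simp; omega
  rw [List.getD_eq_getElem _ _ hlen, List.getElem_map, List.getElem_range']
  simp [Nat.add_comm]

-- the table entry at (k, i) is exactly the longest common extension pvLce
theorem pvTable (lines : List String) (i k : Nat) (hk : 0 < k)
    (h3 : i + 3 * k ≤ lines.length) :
    ((pvExt lines lines.length).getD k []).getD i 0 = pvLce lines lines.length i k 0 := by
  rw [pvExt_getD lines lines.length k hk (by omega)]
  have := pvRowSuffix_getD lines lines.length k (lines.length - k) 0 (by omega) i (by omega)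
  simpa using this

theorem pvSlice_eq_drop_take (lines : List String) (a k : Nat) :
    pvSlice lines a k = (lines.drop a).take k := by
  simp [pvSlice, PySem.List.slice_natCast_add]

theorem pvSlice_eq_iff (lines : List String) (i a k : Nat)
    (hik : i + k ≤ lines.length) (hak : a + k ≤ lines.length) :
    pvSlice lines a k = pvSlice lines i k ↔
      ∀ s, s < k → lines.getD (a + s) "" = lines.getD (i + s) "" := by
  rw [pvSlice_eq_drop_take, pvSlice_eq_drop_take]
  constructor
  · intro h s hs
    have h1 : ((lines.drop a).take k)[s]'(by simp; omega) =
        ((lines.drop i).take k)[s]'(by simp; omega) := by simp [h]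
    rw [List.getElem_take, List.getElem_take, List.getElem_drop, List.getElem_drop] at h1
    rw [List.getD_eq_getElem lines "" (by omega), List.getD_eq_getElem lines "" (by omega)]
    simpa [Nat.add_comm] using h1
  · intro h
    apply List.ext_getElem
    · simp; omega
    · intro s hs1 hs2
      rw [List.getElem_take, List.getElem_take, List.getElem_drop, List.getElem_drop]
      have hsk : s < k := by simp at hs1; omega
      have h2 := h s hsk
      rw [List.getD_eq_getElem lines "" (by omega), List.getD_eq_getElem lines "" (by omega)] at h2
      simpa [Nat.add_comm] using h2

theorem pvBlockLoop_spec (lines : List String) (n k i : Nat) (hk : 0 < k) :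
    ∀ fuel c j0, n - j0 < fuel → 0 < c → j0 = i + c * k →
      c ≤ (pvBlockLoop lines (pvSlice lines i k) n k fuel j0 c).1 ∧
      (pvBlockLoop lines (pvSlice lines i k) n k fuel j0 c).2 =
        i + (pvBlockLoop lines (pvSlice lines i k) n k fuel j0 c).1 * k ∧
      (∀ b, c ≤ b → b < (pvBlockLoop lines (pvSlice lines i k) n k fuel j0 c).1 →
        i + (b + 1) * k ≤ n ∧ pvSlice lines (i + b * k) k = pvSlice lines i k) ∧
      ¬ ((pvBlockLoop lines (pvSlice lines i k) n k fuel j0 c).2 + k ≤ n ∧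
         pvSlice lines ((pvBlockLoop lines (pvSlice lines i k) n k fuel j0 c).2) k = pvSlice lines i k) := by
  intro fuel
  induction fuel with
  | zero =>
    intro c j0 hf hc hj
    exact absurd hf (by omega)
  | succ fuel ih =>
    intro c j0 hf hc hj
    rw [pvBlockLoop]
    split
    · rename_i h
      have hmul : (c + 1) * k = c * k + k := by ring
      obtain ⟨h1, h2, h3, h4⟩ := ih (c + 1) (j0 + k) (by omega) (by omega) (by omega)
      refine ⟨by omega, h2, ?_, h4⟩
      intro b hb1 hb2
      rcases Nat.eq_or_lt_of_le hb1 with heq | hlt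
      · have hbk : i + b * k = j0 := by rw [hj, ← heq]
        have hbk1 : (b + 1) * k = b * k + k := by ring
        exact ⟨by omega, by rw [hbk]; exact h.2⟩
      · exact h3 b (by omega) hb2
    · rename_i h
      exact ⟨le_rfl, hj, fun b hb1 hb2 => absurd hb1 (by omega),
        fun hcon => h ⟨hcon.1, hcon.2⟩⟩

theorem pvRuns_pattern (lines : List String) (n i k : Nat) :
    ∀ b, (∀ t, t < b * k → pvRun lines n i k t) →
    ∀ s, s < k → lines.getD (i + b * k + s) "" = lines.getD (i + s) "" := by
  intro b
  induction b with
  | zero => simp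
  | succ b ih =>
    intro hr s hs
    have hmul : (b + 1) * k = b * k + k := by ring
    have h1 := (hr (b * k + s) (by omega)).2
    have e : i + k + (b * k + s) = i + (b + 1) * k + s := by omega
    have e2 : i + (b * k + s) = i + b * k + s := by omega
    rw [e, e2] at h1
    rw [← h1]
    exact ih (fun t ht => hr t (by omega)) s hs

-- the per-period correspondence: A's block loop result and the LCE determine each other
theorem pvKey (lines : List String) (i k : Nat) (hk : 0 < k)
    (h3 : i + 3 * k ≤ lines.length) :
    (2 < (pvBlockLoop lines (pvSlice lines i k) lines.length k (lines.length + 1) (i + k) 1).1 ↔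
      2 * k ≤ pvLce lines lines.length i k 0) ∧
    (pvBlockLoop lines (pvSlice lines i k) lines.length k (lines.length + 1) (i + k) 1).2 =
      i + k + (pvLce lines lines.length i k 0 / k) * k := by
  set n := lines.length with hn
  obtain ⟨hb1, hb2, hb3, hb4⟩ :=
    pvBlockLoop_spec lines n k i hk (n + 1) 1 (i + k) (by omega) one_pos (by ring_nf)
  obtain ⟨hl1, hl2, hl3⟩ := pvLce_spec lines n i k 0
  set r := pvBlockLoop lines (pvSlice lines i k) n k (n + 1) (i + k) 1 with hr
  set L := pvLce lines n i k 0 with hL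
  set c := r.1 with hc
  have hck : 0 < c * k := Nat.mul_pos (by omega) hk
  -- upper bound: L < c * k
  have hup : L < c * k := by
    by_contra hge
    push_neg at hge
    apply hb4
    have hrun := (hl1 (c * k - 1) (by omega) (by omega)).1
    have hjn : r.2 + k ≤ n := by rw [hb2]; omega
    refine ⟨hjn, ?_⟩
    rw [hb2]
    rw [pvSlice_eq_iff lines i (i + c * k) k (by omega) (by rw [hb2] at hjn; omega)]
    intro s hs
    exact pvRuns_pattern lines n i k c (fun t ht => hl1 t (by omega) (by omega)) s hs
  -- lower bound: (c - 1) * k ≤ L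
  have hsub : (c - 1) * k + k = c * k := by
    have : (c - 1) + 1 = c := by omega
    calc (c - 1) * k + k = ((c - 1) + 1) * k := by ring
    _ = c * k := by rw [this]
  have hlow : (c - 1) * k ≤ L := by
    by_contra hlt
    push_neg at hlt
    apply hl2
    have hc2 : 2 ≤ c := by
      rcases Nat.lt_or_ge c 2 with h | h
      · interval_cases c <;> omega
      · exact h
    have hcm1 := hb3 (c - 1) (by omega) (by omega)
    have hcm1e : (c - 1 + 1) = c := by omega
    rw [hcm1e] at hcm1
    constructor
    · omega
    · obtain ⟨q, s, hsk, hqs⟩ : ∃ q s, s < k ∧ k * q + s = L :=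
        ⟨L / k, L % k, Nat.mod_lt _ hk, Nat.div_add_mod L k⟩
      have hqc : q + 1 < c := by
        have hmul : k * q < k * (c - 1) := by
          have e : (c - 1) * k = k * (c - 1) := by ring
          omega
        have := Nat.lt_of_mul_lt_mul_left hmul
        omega
      have hbq1 := hb3 (q + 1) (by omega) (by omega)
      have hbq1b : i + (q + 1) * k + k ≤ n := by
        have := hbq1.1
        have e : (q + 1 + 1) * k = (q + 1) * k + k := by ring
        omega
      have e1 := (pvSlice_eq_iff lines i (i + (q + 1) * k) k (by omega) hbq1b).1 hbq1.2 s hsk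
      have e2 : lines.getD (i + q * k + s) "" = lines.getD (i + s) "" := by
        rcases Nat.eq_zero_or_pos q with hq0 | hqpos
        · simp [hq0]
        · have hbq := hb3 q (by omega) (by omega)
          have hbqb : i + q * k + k ≤ n := by
            have := hbq.1
            have e : (q + 1) * k = q * k + k := by ring
            omega
          exact (pvSlice_eq_iff lines i (i + q * k) k (by omega) hbqb).1 hbq.2 s hsk
      have eL1 : i + L = i + q * k + s := by
        have e : q * k = k * q := by ring
        omega
      have eL2 : i + k + L = i + (q + 1) * k + s := by
        have : (q + 1) * k = k * q + k := by ring
        omega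
      rw [eL1, eL2, e1, e2]
  have hdiv : L / k = c - 1 := by
    have h1 : c - 1 ≤ L / k := (Nat.le_div_iff_mul_le hk).2 hlow
    have h2 : L / k < c := (Nat.div_lt_iff_lt_mul hk).2 hup
    omega
  constructor
  · constructor
    · intro h2c
      calc 2 * k ≤ (c - 1) * k := Nat.mul_le_mul_right k (by omega)
      _ ≤ L := hlow
    · intro hLk
      have : 2 ≤ L / k := (Nat.le_div_iff_mul_le hk).2 hLk
      omega
  · rw [hb2, hdiv]; omega

theorem pvTryK_eq (lines : List String) (i : Nat) (ks : List Nat)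
    (hks : ∀ k ∈ ks, 0 < k ∧ i + 3 * k ≤ lines.length) :
    pvTryK lines lines.length i ks =
      (pvTryKB (pvExt lines lines.length) i ks).map
        (fun kl => (pvSlice lines i kl.1, i + kl.1 + (kl.2 / kl.1) * kl.1)) := by
  induction ks with
  | nil => rfl
  | cons k rest ih =>
    obtain ⟨hk, h3⟩ := hks k (by simp)
    obtain ⟨hiff, hj⟩ := pvKey lines i k hk h3
    have htab := pvTable lines i k hk h3
    rw [pvTryK, pvTryKB]
    simp only [htab]
    by_cases hc : 2 < (pvBlockLoop lines (pvSlice lines i k) lines.length k (lines.length + 1) (i + k) 1).1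
    · rw [if_pos hc, if_pos (hiff.1 hc)]
      simp [hj]
    · rw [if_neg hc, if_neg (fun hL => hc (hiff.2 hL))]
      exact ih (fun k' hk' => hks k' (List.mem_cons_of_mem _ hk'))

theorem pvOuter_eq (lines : List String) :
    ∀ fuel i out, pvOuterA lines lines.length fuel i out =
      pvOuterB lines (pvExt lines lines.length) lines.length fuel i out := by
  intro fuel
  induction fuel with
  | zero => intro i out; rfl
  | succ fuel ih =>
    intro i out
    rw [pvOuterA, pvOuterB]
    by_cases hi : i < lines.length
    · rw [if_pos hi, if_pos hi]
      have hks : ∀ k ∈ List.range' 1 ((lines.length - i) / 3),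
          0 < k ∧ i + 3 * k ≤ lines.length := by
        intro k hk
        have hmem := List.mem_range'_1.1 hk
        refine ⟨by omega, ?_⟩
        have h3 : k ≤ (lines.length - i) / 3 := by omega
        have := (Nat.le_div_iff_mul_le (by norm_num)).1 h3
        omega
      have hmap := pvTryK_eq lines i (List.range' 1 ((lines.length - i) / 3)) hks
      cases hB : pvTryKB (pvExt lines lines.length) i (List.range' 1 ((lines.length - i) / 3)) with
      | none =>
        rw [hmap, hB]
        exact ih (i + 1) _
      | some kl =>
        obtain ⟨k, L⟩ := kl
        rw [hmap, hB]
        exact ih _ _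
    · rw [if_neg hi, if_neg hi]

-- ===== VERDICT (by name: the statement is the Claim_ definition above) =====
theorem dedup_lines_py_spec : Claim_equal_dedup_lines_py := by
  unfold Claim_equal_dedup_lines_py Spec_dedup_lines_py
  intro lines _
  unfold dedup_lines_py dedup_lines_py_alt
  split
  · rename_i h
    rw [h]
    rfl
  · exact pvOuter_eq lines (lines.length + 1) 0 []
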